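-- pv_equiv track=rewrite | github.com/jstamagal/research | prism-dual-reader-gates-paraphrase-agreement/code/models.py | deterministic_tokenize
-- ===== SOURCE A (Python) =====
-- from typing import Any, Dict, List, Tuple
--
-- def deterministic_tokenize(text: str) -> List[str]:
--     cleaned = (
--         text.replace("\n", " ")
--         .replace(",", " ")
--         .replace(".", " ")
--         .replace(":", " ")
--         .replace(";", " ")
--         .replace("(", " ")
--         .replace(")", " ")
--     )
--     return [t for t in cleaned.split(" ") if t]
-- ===== SOURCE B (Python) =====
-- _DELIMS = {'\n', ',', '.', ':', ';', '(', ')', ' '}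
--
-- def deterministic_tokenize(text):
--     tokens = []
--     buf = ""
--     for ch in text:
--         if ch in _DELIMS:
--             if buf:
--                 tokens.append(buf)
--                 buf = ""
--         else:
--             buf += ch
--     if buf:
--         tokens.append(buf)
--     return tokens
-- ===== Notes on version B (the rewrite author's own statement) =====
-- stated objective: alternative
-- what changed: Replaces the seven-fold replace-then-split-then-filter pipeline (eight passes over the text) by a single left-to-right pass with a current-token buffer flushed at each delimiter.
import Mathlib
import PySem

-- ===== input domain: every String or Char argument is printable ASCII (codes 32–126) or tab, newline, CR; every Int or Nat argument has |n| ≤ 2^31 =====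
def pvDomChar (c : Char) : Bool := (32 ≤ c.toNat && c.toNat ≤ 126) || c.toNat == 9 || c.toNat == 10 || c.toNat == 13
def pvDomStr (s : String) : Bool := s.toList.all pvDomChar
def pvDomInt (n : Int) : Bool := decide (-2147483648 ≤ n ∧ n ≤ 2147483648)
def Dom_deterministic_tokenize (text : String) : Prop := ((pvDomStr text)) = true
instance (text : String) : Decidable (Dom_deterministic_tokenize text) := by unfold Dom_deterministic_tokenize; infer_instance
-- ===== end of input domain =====

-- B replaces A's seven-fold replace-then-split-then-filter pipeline by a single pass with a token buffer; same cost class, different decomposition.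

-- ===== PORT A =====
def deterministic_tokenize (text : String) : List String :=
  -- cleaned = the seven chained replaces; .split(" ") with the nonempty literal " " is PySem.Chars.splitOn
  ((PySem.Chars.splitOn
      (PySem.Str.replace (PySem.Str.replace (PySem.Str.replace (PySem.Str.replace
        (PySem.Str.replace (PySem.Str.replace (PySem.Str.replace text "\n" " ")
          "," " ") "." " ") ":" " ") ";" " ") "(" " ") ")" " ").toList [' ']).filter
    (fun t => !t.isEmpty)).map String.ofList

-- ===== PORT B =====
def pvDelim (c : Char) : Bool := c ∈ ['\n', ',', '.', ':', ';', '(', ')', ' ']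

def pvAltGo : List Char → List Char → List String → List String
  | [], buf, tokens => if buf.isEmpty then tokens else tokens ++ [String.ofList buf]
  | c :: rest, buf, tokens =>
      if pvDelim c then
        if buf.isEmpty then pvAltGo rest [] tokens
        else pvAltGo rest [] (tokens ++ [String.ofList buf])
      else pvAltGo rest (buf ++ [c]) tokens

def deterministic_tokenize_alt (text : String) : List String :=
  pvAltGo text.toList [] []

-- ===== PRECONDITION & SPEC =====
def Spec_deterministic_tokenize (text : String) (out : List String) : Prop := out = deterministic_tokenize_alt text
instance (text : String) (out : List String) : Decidable (Spec_deterministic_tokenize text out) := by unfold Spec_deterministic_tokenize; infer_instance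

-- ===== CLAIM (what is proved, stated in full; the proofs are below) =====
def Claim_equal_deterministic_tokenize : Prop := ∀ (text : String), Dom_deterministic_tokenize text → Spec_deterministic_tokenize text (deterministic_tokenize text)

-- ===== LEMMAS AND PROOFS =====

/-- The character substitution A's chain of single-character replaces performs. -/
def pvSub (c : Char) : Char := if pvDelim c then ' ' else c

/-- replace with single-char old/new is a map. -/
theorem replace_go_single (a b : Char) :
    ∀ (l : List Char) (fuel : Nat) (acc : List Char), l.length ≤ fuel →
      PySem.Chars.replace.go [a] [b] fuel l acc
        = acc.reverse ++ l.map (fun c => if c = a then b else c) := by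
  intro l
  induction l with
  | nil =>
      intro fuel acc _
      cases fuel <;> simp [PySem.Chars.replace.go]
  | cons c t ih =>
      intro fuel acc h
      cases fuel with
      | zero => simp at h
      | succ fuel =>
        have hf : t.length ≤ fuel := by simpa using h
        by_cases hc : c = a
        · subst hc
          simp [PySem.Chars.replace.go, List.isPrefixOf, ih fuel (b :: acc) hf]
        · have hpre : ([a].isPrefixOf (c :: t)) = false := by
            simp [List.isPrefixOf]
            exact fun h' => hc h'.symm
          simp [PySem.Chars.replace.go, hpre, ih fuel (c :: acc) hf, hc]

theorem replace_single (a b : Char) (l : List Char) :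
    PySem.Chars.replace l [a] [b] = l.map (fun c => if c = a then b else c) := by
  simp [PySem.Chars.replace, replace_go_single a b l l.length [] le_rfl]

/-- The pieces that splitting on a single space produces, with the in-progress piece reversed. -/
def pvPieces : List Char → List Char → List (List Char)
  | [], cur => [cur.reverse]
  | c :: rest, cur => if c = ' ' then cur.reverse :: pvPieces rest [] else pvPieces rest (c :: cur)

theorem splitOn_go_space :
    ∀ (l : List Char) (fuel : Nat) (cur : List Char) (acc : List (List Char)), l.length ≤ fuel →
      PySem.Chars.splitOn.go [' '] fuel l cur acc = acc.reverse ++ pvPieces l cur := by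
  intro l
  induction l with
  | nil =>
      intro fuel cur acc _
      cases fuel <;> simp [PySem.Chars.splitOn.go, pvPieces]
  | cons c t ih =>
      intro fuel cur acc h
      cases fuel with
      | zero => simp at h
      | succ fuel =>
        have hf : t.length ≤ fuel := by simpa using h
        by_cases hc : c = ' '
        · subst hc
          simp [PySem.Chars.splitOn.go, List.isPrefixOf, pvPieces,
            ih fuel [] (cur.reverse :: acc) hf]
        · have hpre : ([' '].isPrefixOf (c :: t)) = false := by
            simp [List.isPrefixOf]
            exact fun h' => hc h'.symm
          simp [PySem.Chars.splitOn.go, hpre, pvPieces, hc, ih fuel (c :: cur) acc hf]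

theorem splitOn_space (l : List Char) :
    PySem.Chars.splitOn l [' '] = pvPieces l [] := by
  simp [PySem.Chars.splitOn, splitOn_go_space l (l.length + 1) [] [] (by omega)]

/-- Main bridge: filtering the split of the substituted list equals the single-pass fold. -/
theorem pieces_eq_altGo :
    ∀ (l : List Char) (buf : List Char) (tokens : List String),
      tokens ++ ((pvPieces (l.map pvSub) buf.reverse).filter (fun t => !t.isEmpty)).map String.ofList
        = pvAltGo l buf tokens := by
  intro l
  induction l with
  | nil =>
      intro buf tokens
      by_cases hb : buf.isEmpty
      · simp_all [pvPieces, pvAltGo, List.isEmpty_iff]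
      · simp [pvPieces, pvAltGo, hb, List.filter]
  | cons c t ih =>
      intro buf tokens
      by_cases hd : pvDelim c
      · have hsub : pvSub c = ' ' := by simp [pvSub, hd]
        by_cases hb : buf.isEmpty
        · have : buf = [] := by simpa [List.isEmpty_iff] using hb
          subst this
          simpa [pvPieces, pvAltGo, hd, hsub, List.filter] using ih [] tokens
        · have hb' : buf.isEmpty = false := by simpa using hb
          have := ih [] (tokens ++ [String.ofList buf])
          simpa [pvPieces, pvAltGo, hd, hsub, List.filter, hb'] using this
      · have hsub : pvSub c = c := by simp [pvSub, hd]
        have hcs : c ≠ ' ' := by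
          intro h; subst h; simp [pvDelim] at hd
        have := ih (buf ++ [c]) tokens
        simpa [pvPieces, pvAltGo, hd, hsub, hcs] using this

/-- Single-character replace at the String level. -/
theorem toList_replace_single (s : String) (oa ob : String) (a b : Char)
    (ha : oa.toList = [a]) (hb : ob.toList = [b]) :
    (PySem.Str.replace s oa ob).toList = s.toList.map (fun c => if c = a then b else c) := by
  rw [PySem.Str.toList_replace, ha, hb, replace_single]

/-- A's chain of seven replaces maps every delimiter (space included, fixed by each pass) to a space. -/
theorem cleaned_toList (text : String) :
    (PySem.Str.replace (PySem.Str.replace (PySem.Str.replace (PySem.Str.replace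
      (PySem.Str.replace (PySem.Str.replace (PySem.Str.replace text "\n" " ")
        "," " ") "." " ") ":" " ") ";" " ") "(" " ") ")" " ").toList
      = text.toList.map pvSub := by
  rw [toList_replace_single _ _ _ ')' ' ' (by decide) (by decide)]
  rw [toList_replace_single _ _ _ '(' ' ' (by decide) (by decide)]
  rw [toList_replace_single _ _ _ ';' ' ' (by decide) (by decide)]
  rw [toList_replace_single _ _ _ ':' ' ' (by decide) (by decide)]
  rw [toList_replace_single _ _ _ '.' ' ' (by decide) (by decide)]
  rw [toList_replace_single _ _ _ ',' ' ' (by decide) (by decide)]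
  rw [toList_replace_single _ _ _ '\n' ' ' (by decide) (by decide)]
  simp only [List.map_map]
  refine List.map_congr_left (fun c _ => ?_)
  simp only [pvSub, pvDelim]
  by_cases h1 : c = '\n' <;> by_cases h2 : c = ',' <;> by_cases h3 : c = '.' <;>
    by_cases h4 : c = ':' <;> by_cases h5 : c = ';' <;> by_cases h6 : c = '(' <;>
    by_cases h7 : c = ')' <;> by_cases h8 : c = ' ' <;> simp_all

-- ===== VERDICT (by name: the statement is the Claim_ definition above) =====
theorem deterministic_tokenize_spec : Claim_equal_deterministic_tokenize := by
  intro text _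
  unfold Spec_deterministic_tokenize deterministic_tokenize deterministic_tokenize_alt
  rw [cleaned_toList, splitOn_space]
  simpa using pieces_eq_altGo text.toList [] []
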